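-- pv_equiv track=rewrite | github.com/gianlucamazza/website_ai-knowledge | scripts/fix_markdown_violations.py | fix_md022_heading_spacing
-- ===== SOURCE A (Python) =====
-- def fix_md022_heading_spacing(content: str) -> str:
--     """Fix heading spacing issues."""
--     lines = content.split('\n')
--     new_lines = []
--
--     for i, line in enumerate(lines):
--         if line.startswith('#') and line.strip():
--             # Add blank line before heading if missing (except first heading or after frontmatter)
--             prev_line = lines[i - 1] if i > 0 else ""
--             if (i > 0 and prev_line.strip() and
--                 prev_line.strip() != '---' and
--                 not prev_line.startswith('#')):
--                 new_lines.append("")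
--
--             new_lines.append(line)
--
--             # Add blank line after heading if missing
--             next_line = lines[i + 1] if i + 1 < len(lines) else ""
--             if next_line.strip() and not next_line.startswith('#'):
--                 new_lines.append("")
--         else:
--             new_lines.append(line)
--
--     return '\n'.join(new_lines)
-- ===== SOURCE B (Python) =====
-- def fix_md022_heading_spacing(content: str) -> str:
--     """Fix heading spacing issues (two-pass: mark insertion points, then emit)."""
--     lines = content.split('\n')
--
--     def is_heading(s):
--         return s.startswith('#') and s.strip()
--
--     blank_before = set()
--     for i, line in enumerate(lines):
--         if is_heading(line):
--             if i > 0: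
--                 prev = lines[i - 1]
--                 if prev.strip() and prev.strip() != '---' and not prev.startswith('#'):
--                     blank_before.add(i)
--         elif line.strip() and i > 0 and is_heading(lines[i - 1]):
--             blank_before.add(i)
--
--     out = []
--     for i, line in enumerate(lines):
--         if i in blank_before:
--             out.append("")
--         out.append(line)
--     return '\n'.join(out)
-- ===== Notes on version B (the rewrite author's own statement) =====
-- stated objective: alternative
-- what changed: B replaces A's single interleaved append loop by two passes: a first pass computes the set of line indices that need a blank line inserted before them (folding A's after-heading rule into a before-line condition on the following line), and a second pass emits the lines with those insertions.
import Mathlib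
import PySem

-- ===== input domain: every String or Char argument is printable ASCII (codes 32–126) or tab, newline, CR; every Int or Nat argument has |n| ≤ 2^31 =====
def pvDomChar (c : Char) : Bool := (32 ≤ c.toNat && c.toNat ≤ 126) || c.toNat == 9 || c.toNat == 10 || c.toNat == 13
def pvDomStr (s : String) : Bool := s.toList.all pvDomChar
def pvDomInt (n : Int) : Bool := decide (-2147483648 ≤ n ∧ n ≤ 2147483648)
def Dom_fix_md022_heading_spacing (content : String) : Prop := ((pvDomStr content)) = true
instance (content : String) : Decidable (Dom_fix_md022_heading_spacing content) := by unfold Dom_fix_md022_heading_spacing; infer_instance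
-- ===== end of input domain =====

-- B rewrites A's single interleaved loop as two passes (first mark the indices needing a blank line before them, then emit); same output, same O(n) cost.

-- ===== PORT A =====
-- the loop body of A, one step of the fold over enumerate(lines)
def pvStepA (lines : List String) (new_lines : List String) (p : Int × String) : List String :=
  let i := p.1
  let line := p.2
  if PySem.Str.startswith line "#" && !(PySem.Str.strip line == "") then
    let prev_line := if i > 0 then PySem.List.pyGetD lines (i - 1) "" else ""
    let new_lines :=
      if decide (i > 0) && !(PySem.Str.strip prev_line == "") &&
         !(PySem.Str.strip prev_line == "---") && !(PySem.Str.startswith prev_line "#")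
      then new_lines ++ [""] else new_lines
    let new_lines := new_lines ++ [line]
    let next_line := if i + 1 < (lines.length : Int) then PySem.List.pyGetD lines (i + 1) "" else ""
    if !(PySem.Str.strip next_line == "") && !(PySem.Str.startswith next_line "#")
    then new_lines ++ [""] else new_lines
  else new_lines ++ [line]

def fix_md022_heading_spacing (content : String) : String :=
  let lines := (PySem.Str.split? content "\n").getD []
  let new_lines := (PySem.List.enumerate lines 0).foldl (pvStepA lines) []
  PySem.Str.join "\n" new_lines

-- ===== PORT B =====
def pvIsHeading (s : String) : Bool := PySem.Str.startswith s "#" && !(PySem.Str.strip s == "")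

-- first pass: add index i to the set when a blank line must be inserted before line i
def pvStepSet (lines : List String) (s : PySem.Set Int) (p : Int × String) : PySem.Set Int :=
  let i := p.1
  let line := p.2
  if pvIsHeading line then
    if decide (i > 0) &&
       (let prev := PySem.List.pyGetD lines (i - 1) ""
        !(PySem.Str.strip prev == "") && !(PySem.Str.strip prev == "---") &&
        !(PySem.Str.startswith prev "#"))
    then PySem.Set.add s i else s
  else
    if !(PySem.Str.strip line == "") && decide (i > 0) &&
       pvIsHeading (PySem.List.pyGetD lines (i - 1) "")
    then PySem.Set.add s i else s

-- second pass: emit, inserting a blank line before each marked index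
def pvStepOut (blank_before : PySem.Set Int) (acc : List String) (p : Int × String) : List String :=
  (if PySem.Set.contains blank_before p.1 then acc ++ [""] else acc) ++ [p.2]

def fix_md022_heading_spacing_alt (content : String) : String :=
  let lines := (PySem.Str.split? content "\n").getD []
  let blank_before := (PySem.List.enumerate lines 0).foldl (pvStepSet lines) PySem.Set.empty
  let out := (PySem.List.enumerate lines 0).foldl (pvStepOut blank_before) []
  PySem.Str.join "\n" out

-- ===== PRECONDITION & SPEC =====
def Spec_fix_md022_heading_spacing (content : String) (out : String) : Prop := out = fix_md022_heading_spacing_alt content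
instance (content : String) (out : String) : Decidable (Spec_fix_md022_heading_spacing content out) := by unfold Spec_fix_md022_heading_spacing; infer_instance

-- ===== CLAIM (what is proved, stated in full; the proofs are below) =====
def Claim_equal_fix_md022_heading_spacing : Prop := ∀ (content : String), Dom_fix_md022_heading_spacing content → Spec_fix_md022_heading_spacing content (fix_md022_heading_spacing content)

-- ===== LEMMAS AND PROOFS =====

-- A's blank-before condition at index i
def pvPreC (L : List String) (i : Int) : Bool :=
  decide (i > 0) &&
  (let prev := PySem.List.pyGetD L (i - 1) ""
   !(PySem.Str.strip prev == "") && !(PySem.Str.strip prev == "---") &&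
   !(PySem.Str.startswith prev "#"))

-- A's blank-after condition at index i (about line i+1)
def pvAfterC (L : List String) (i : Int) : Bool :=
  let nx := if i + 1 < (L.length : Int) then PySem.List.pyGetD L (i + 1) "" else ""
  !(PySem.Str.strip nx == "") && !(PySem.Str.startswith nx "#")

-- B's first-pass condition, read off the list
def pvCondSet (L : List String) (i : Int) : Bool :=
  if pvIsHeading (PySem.List.pyGetD L i "") then pvPreC L i
  else
    !(PySem.Str.strip (PySem.List.pyGetD L i "") == "") && decide (i > 0) &&
    pvIsHeading (PySem.List.pyGetD L (i - 1) "")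

-- A appends a blank after line k iff pvPostC L k
def pvPostC (L : List String) (k : Nat) : Bool :=
  pvIsHeading (PySem.List.pyGetD L (k : Int) "") && pvAfterC L (k : Int)

-- the pending blank A has already appended when B's pass reaches index k
def pvPend (L : List String) (k : Nat) : List String :=
  if decide (0 < k) && pvPostC L (k - 1) then [""] else []

-- the list of indices B's first pass collects, from position k on
def pvIdxFrom (L : List String) : List String → Nat → List Int
  | [], _ => []
  | _ :: rest, k => (if pvCondSet L (k : Int) then [(k : Int)] else []) ++ pvIdxFrom L rest (k + 1)


theorem pvGetD_of_some {L : List String} {k : Nat} {x : String} (h : L[k]? = some x) :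
    PySem.List.pyGetD L (k : Int) "" = x := by
  simp [PySem.List.pyGetD_natCast, List.getD, h]

theorem pvStepSet_eq (L : List String) (s : PySem.Set Int) (i : Int) (x : String)
    (hx : PySem.List.pyGetD L i "" = x) :
    pvStepSet L s (i, x) = if pvCondSet L i then PySem.Set.add s i else s := by
  subst hx
  simp only [pvStepSet, pvCondSet, pvPreC]
  cases pvIsHeading (PySem.List.pyGetD L i "") <;> simp

theorem pvStepA_eq (L : List String) (acc : List String) (i : Int) (x : String) :
    pvStepA L acc (i, x) =
      if pvIsHeading x then
        ((if pvPreC L i then acc ++ [""] else acc) ++ [x]) ++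
          (if pvAfterC L i then [""] else [])
      else acc ++ [x] := by
  by_cases hi : i > 0 <;>
    simp only [pvStepA, pvIsHeading, pvPreC, pvAfterC, hi, decide_true, decide_false,
      Bool.true_and, Bool.false_and, if_true, if_false, Bool.false_eq_true] <;>
    split_ifs <;> simp_all

theorem pvPend_succ (L : List String) (k : Nat) :
    pvPend L (k + 1) = if pvPostC L k then [""] else [] := by
  simp [pvPend]

theorem pvPend_of_ge (L : List String) (k : Nat) (h : L.length ≤ k) : pvPend L k = [] := by
  cases k with
  | zero => simp [pvPend]
  | succ m =>
    have hg : ¬ ((m : Int) + 1 < (L.length : Int)) := by push_cast; omega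
    have hst : PySem.Str.strip "" = "" := by decide
    simp [pvPend, pvPostC, pvAfterC, hg, hst]

theorem pvPend_of_heading (L : List String) (k : Nat) (x : String)
    (hx : PySem.List.pyGetD L (k : Int) "" = x) (hhd : pvIsHeading x = true) :
    pvPend L k = [] := by
  cases k with
  | zero => simp [pvPend]
  | succ m =>
    have hsw : PySem.Str.startswith x "#" = true := by
      simp only [pvIsHeading, Bool.and_eq_true] at hhd
      exact hhd.1
    have hsw' : PySem.Chars.startswith x.toList ['#'] = true := by simpa using hsw
    have hcast : ((m + 1 : Nat) : Int) = (m : Int) + 1 := by push_cast; ring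
    rw [hcast] at hx
    by_cases hg : (m : Int) + 1 < (L.length : Int)
    · simp [pvPend, pvPostC, pvAfterC, hg, hx, hsw']
    · have hst : PySem.Str.strip "" = "" := by decide
      simp [pvPend, pvPostC, pvAfterC, hg, hst]

theorem pvPend_of_not_heading (L : List String) (k : Nat) (x : String) (hk : k < L.length)
    (hx : PySem.List.pyGetD L (k : Int) "" = x) (hhd : pvIsHeading x = false) :
    pvPend L k = if pvCondSet L (k : Int) then [""] else [] := by
  cases k with
  | zero =>
    have h0 : ((0 : Nat) : Int) = (0 : Int) := rfl
    rw [h0] at hx ⊢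
    simp [pvPend, pvCondSet, hx, hhd]
  | succ m =>
    have hcast : ((m + 1 : Nat) : Int) = (m : Int) + 1 := by push_cast; ring
    have hg : (m : Int) + 1 < (L.length : Int) := by push_cast at hk ⊢; omega
    have hprev : (m : Int) + 1 - 1 = (m : Int) := by ring
    rw [hcast] at hx ⊢
    cases hst : (PySem.Str.strip x == "") with
    | true =>
      simp [pvPend, pvPostC, pvAfterC, pvCondSet, hg, hx, hhd, hst, hprev]
    | false =>
      cases hb : PySem.Str.startswith x "#" with
      | true =>
        exfalso
        unfold pvIsHeading at hhd
        rw [hb, hst] at hhd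
        simp at hhd
      | false =>
        have hb' : PySem.Chars.startswith x.toList ['#'] = false := by simpa using hb
        have hdec : ((m : Int) + 1 > 0) := by omega
        cases hdP : pvIsHeading (PySem.List.pyGetD L (m : Int) "") <;>
          simp [pvPend, pvPostC, pvAfterC, pvCondSet, hg, hx, hhd, hst, hprev, hb', hdec, hdP]

theorem pvSetFold (L : List String) : ∀ (rest : List String) (k : Nat) (s : PySem.Set Int),
    rest = L.drop k → (∀ j ∈ s, j < (k : Int)) →
    (PySem.List.enumerate rest (k : Int)).foldl (pvStepSet L) s = s ++ pvIdxFrom L rest k := by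
  intro rest
  induction rest with
  | nil => intro k s _ _; simp [PySem.List.enumerate_nil, pvIdxFrom]
  | cons x rest ih =>
    intro k s h hb
    have hk : k < L.length := by
      by_contra hnk
      push_neg at hnk
      rw [List.drop_eq_nil_of_le hnk] at h
      cases h
    have hx0 : L[k]? = some x := by
      have h0 : (L.drop k)[0]? = L[k]? := by simp
      rw [← h0, ← h]; rfl
    have hx : PySem.List.pyGetD L (k : Int) "" = x := pvGetD_of_some hx0
    have hrest : rest = L.drop (k + 1) := by
      have ht := congrArg List.tail h
      simpa [List.tail_drop] using ht
    rw [PySem.List.enumerate_cons, List.foldl_cons,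
      show ((k : Int) + 1) = ((k + 1 : Nat) : Int) by push_cast; ring,
      pvStepSet_eq L s (k : Int) x hx]
    unfold pvIdxFrom
    by_cases hc : pvCondSet L (k : Int) = true
    · have hadd : PySem.Set.add s (k : Int) = s ++ [(k : Int)] := by
        have hns : (k : Int) ∉ s := fun hm => absurd (hb _ hm) (by omega)
        simp [PySem.Set.add, PySem.Set.contains, hns]
    
      rw [if_pos hc, if_pos hc, hadd, ih (k + 1) (s ++ [(k : Int)]) hrest
        (by intro j hj
            rcases List.mem_append.mp hj with hj | hj
            · have := hb _ hj; push_cast; omega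
            · simp at hj; subst hj; push_cast; omega)]
      simp
    · rw [if_neg hc, if_neg hc, ih (k + 1) s hrest
        (by intro j hj; have := hb _ hj; push_cast; omega)]
      simp

theorem pvMemIdxFrom (L : List String) : ∀ (rest : List String) (k : Nat) (m : Nat),
    rest = L.drop k →
    (((m : Int) ∈ pvIdxFrom L rest k) ↔ (k ≤ m ∧ m < L.length ∧ pvCondSet L (m : Int) = true)) := by
  intro rest
  induction rest with
  | nil =>
    intro k m h
    have hk : L.length ≤ k := by
      by_contra hnk
      push_neg at hnk
      have := List.drop_eq_nil_iff.mp h.symm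
      omega
    simp [pvIdxFrom]
    omega
  | cons x rest ih =>
    intro k m h
    have hk : k < L.length := by
      by_contra hnk
      push_neg at hnk
      rw [List.drop_eq_nil_of_le hnk] at h
      cases h
    have hrest : rest = L.drop (k + 1) := by
      have ht := congrArg List.tail h
      simpa [List.tail_drop] using ht
    unfold pvIdxFrom
    rw [List.mem_append, ih (k + 1) m hrest]
    constructor
    · rintro (hm | ⟨h1, h2, h3⟩)
      · by_cases hc : pvCondSet L (k : Int) = true
        · rw [if_pos hc] at hm
          simp at hm
          have hmk : m = k := by exact_mod_cast hm
          subst hmk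
          exact ⟨le_rfl, hk, hc⟩
        · rw [if_neg hc] at hm; simp at hm
      · exact ⟨by omega, h2, h3⟩
    · rintro ⟨h1, h2, h3⟩
      by_cases hmk : m = k
      · subst hmk
        rw [if_pos h3]
        exact Or.inl (by simp)
      · exact Or.inr ⟨by omega, h2, h3⟩

theorem pvMainInv (L : List String) (S : PySem.Set Int)
    (hS : ∀ m : Nat, m < L.length → (PySem.Set.contains S (m : Int) = pvCondSet L (m : Int))) :
    ∀ (rest : List String) (k : Nat) (acc : List String), rest = L.drop k →
    (PySem.List.enumerate rest (k : Int)).foldl (pvStepA L) (acc ++ pvPend L k) =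
    (PySem.List.enumerate rest (k : Int)).foldl (pvStepOut S) acc := by
  intro rest
  induction rest with
  | nil =>
    intro k acc h
    have hk : L.length ≤ k := by
      by_contra hnk
      push_neg at hnk
      have := List.drop_eq_nil_iff.mp h.symm
      omega
    simp [PySem.List.enumerate_nil, pvPend_of_ge L k hk]
  | cons x rest ih =>
    intro k acc h
    have hk : k < L.length := by
      by_contra hnk
      push_neg at hnk
      rw [List.drop_eq_nil_of_le hnk] at h
      cases h
    have hx0 : L[k]? = some x := by
      have h0 : (L.drop k)[0]? = L[k]? := by simp
      rw [← h0, ← h]; rfl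
    have hx : PySem.List.pyGetD L (k : Int) "" = x := pvGetD_of_some hx0
    have hrest : rest = L.drop (k + 1) := by
      have ht := congrArg List.tail h
      simpa [List.tail_drop] using ht
    rw [PySem.List.enumerate_cons, List.foldl_cons, List.foldl_cons,
      show ((k : Int) + 1) = ((k + 1 : Nat) : Int) by push_cast; ring]
    have hco : PySem.Set.contains S (k : Int) = pvCondSet L (k : Int) := hS k hk
    have hstep : pvStepA L (acc ++ pvPend L k) ((k : Int), x) =
        pvStepOut S acc ((k : Int), x) ++ pvPend L (k + 1) := by
      rw [pvStepA_eq]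
      unfold pvStepOut
      rw [pvPend_succ]
      cases hhd : pvIsHeading x with
      | true =>
        rw [if_pos rfl, pvPend_of_heading L k x hx hhd]
        have hcs : pvCondSet L (k : Int) = pvPreC L (k : Int) := by
          simp [pvCondSet, hx, hhd]
        have hpost : pvPostC L k = pvAfterC L (k : Int) := by
          simp [pvPostC, hx, hhd]
        rw [hco, hcs, hpost]
        simp
      | false =>
        rw [if_neg (by simp [hhd]), pvPend_of_not_heading L k x hk hx hhd]
        have hpost : pvPostC L k = false := by
          simp [pvPostC, hx, hhd]
        rw [hco, hpost]
        by_cases hc : pvCondSet L (k : Int) = true <;> simp [hc]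
    rw [hstep]
    exact ih (k + 1) (pvStepOut S acc ((k : Int), x)) hrest

theorem pvBothFold (L : List String) :
    (PySem.List.enumerate L 0).foldl (pvStepA L) [] =
      (PySem.List.enumerate L 0).foldl
        (pvStepOut ((PySem.List.enumerate L 0).foldl (pvStepSet L) PySem.Set.empty)) [] := by
  have hdrop : L = L.drop 0 := by simp
  have hSF := pvSetFold L L 0 PySem.Set.empty hdrop (by intro j hj; cases hj)
  simp only [Nat.cast_zero] at hSF
  have hS : ∀ m : Nat, m < L.length →
      (PySem.Set.contains ((PySem.List.enumerate L 0).foldl (pvStepSet L) PySem.Set.empty)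
        (m : Int) = pvCondSet L (m : Int)) := by
    intro m hm
    rw [hSF]
    have hmem := pvMemIdxFrom L L 0 m hdrop
    cases hc : pvCondSet L (m : Int) with
    | true =>
      have hin : (m : Int) ∈ pvIdxFrom L L 0 := hmem.mpr ⟨Nat.zero_le _, hm, hc⟩
      simp [PySem.Set.contains, PySem.Set.empty, hin]
    | false =>
      have hnot : (m : Int) ∉ pvIdxFrom L L 0 :=
        fun hin => absurd ((hmem.mp hin).2.2) (by simp [hc])
      simp [PySem.Set.contains, PySem.Set.empty, hnot]
  have hmain := pvMainInv L _ hS L 0 [] hdrop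
  simp only [Nat.cast_zero] at hmain
  have hpend : ([] ++ pvPend L 0 : List String) = [] := by simp [pvPend]
  rw [hpend] at hmain
  exact hmain

-- ===== VERDICT (by name: the statement is the Claim_ definition above) =====
theorem fix_md022_heading_spacing_spec : Claim_equal_fix_md022_heading_spacing := by
  intro content _
  unfold Spec_fix_md022_heading_spacing fix_md022_heading_spacing fix_md022_heading_spacing_alt
  exact congrArg (PySem.Str.join "\n") (pvBothFold ((PySem.Str.split? content "\n").getD []))
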